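-- pv_equiv track=rewrite | github.com/Haseebi-khan/Python-Language | StringAssigment/1.7.ReplaceingWords.py | ReplacingString
-- ===== SOURCE A (Python) =====
-- def ReplacingString(string):
--
--     wordsList = string.split()
--     notFound = False
--     poorFound = False
--
--     for i, word in enumerate(wordsList):
--         if word == 'not':
--             notIndex = i
--             notFound = True
--         if notFound and word.lower() == 'poor':
--             poorIndex = i
--             poorFound = True
--             break
--
--     if notFound and poorFound and notIndex < poorIndex :
--         resultWords = wordsList[:notIndex] + ['good'] + wordsList[poorIndex+1:]
--         result = " ".join(resultWords)
--     else:
--         result = string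
--
--     return result + "!"
-- ===== SOURCE B (Python) =====
-- def ReplacingString(string):
--     words = string.split()
--     poorIndex = next((i for i, w in enumerate(words)
--                       if w.lower() == 'poor' and 'not' in words[:i]), None)
--     if poorIndex is None:
--         return string + "!"
--     notIndex = poorIndex - 1
--     while words[notIndex] != 'not':
--         notIndex -= 1
--     return " ".join(words[:notIndex] + ['good'] + words[poorIndex + 1:]) + "!"
-- ===== Notes on version B (the rewrite author's own statement) =====
-- stated objective: alternative
-- what changed: A makes one forward pass tracking notFound/notIndex flags with a break; B first locates the earliest 'poor' preceded by some exact 'not' (membership test on the prefix), then scans backward from it for the latest 'not', with no flag state.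
import Mathlib
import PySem

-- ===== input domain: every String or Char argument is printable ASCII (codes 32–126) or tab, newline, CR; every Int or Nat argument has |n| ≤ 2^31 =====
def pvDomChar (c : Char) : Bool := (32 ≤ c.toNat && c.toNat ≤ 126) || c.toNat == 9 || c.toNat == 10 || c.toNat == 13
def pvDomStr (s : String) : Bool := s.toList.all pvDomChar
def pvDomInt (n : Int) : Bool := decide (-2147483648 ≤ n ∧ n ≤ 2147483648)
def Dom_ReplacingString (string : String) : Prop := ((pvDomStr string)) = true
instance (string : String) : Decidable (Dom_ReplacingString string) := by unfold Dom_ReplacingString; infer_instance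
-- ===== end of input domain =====

-- B replaces A's one-pass flag tracking by a forward search for the first 'poor' preceded
-- by an exact 'not', plus a backward scan for the latest 'not' (objective: alternative).

-- ===== PORT A =====
-- A's for-loop with break, state (notFound, notIndex, poorFound, poorIndex);
-- notIndex/poorIndex default 0 (Python leaves them unbound until first assignment,
-- and A never reads them unless the corresponding flag is set).
def pvLoopA : List String → Nat → Bool → Nat → Bool × Nat × Bool × Nat
  | [], _, nf, ni => (nf, ni, false, 0)
  | w :: rest, i, nf, ni =>
    let nf' := if w == "not" then true else nf
    let ni' := if w == "not" then i else ni
    if nf' && (PySem.Str.lower w == "poor") then (nf', ni', true, i)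
    else pvLoopA rest (i + 1) nf' ni'

def ReplacingString (string : String) : String :=
  let wordsList := PySem.Str.split₀ string
  let r := pvLoopA wordsList 0 false 0
  let notFound := r.1
  let notIndex := r.2.1
  let poorFound := r.2.2.1
  let poorIndex := r.2.2.2
  let result :=
    if notFound && poorFound && decide (notIndex < poorIndex) then
      -- wordsList[:notIndex] / wordsList[poorIndex+1:] with Nat indices: exact
      -- (PySem.List.slice_to_natCast / slice_from_natCast)
      PySem.Str.join " " (wordsList.take notIndex ++ ["good"] ++ wordsList.drop (poorIndex + 1))
    else string
  result ++ "!"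

-- ===== PORT B =====
-- first index i with words[i].lower() == 'poor' and 'not' in words[:i]
def pvFindPoorB (ws : List String) : List String → Nat → Option Nat
  | [], _ => none
  | w :: rest, i =>
    if PySem.Str.lower w == "poor" && (ws.take i).contains "not" then some i
    else pvFindPoorB ws rest (i + 1)

-- Source B's 'while words[notIndex] != "not": notIndex -= 1', started at poorIndex-1;
-- exact whenever 'not' occurs in words[:j+1] (guaranteed by pvFindPoorB), where the
-- index stays in range, so getD never takes its default.
def pvBackNot (ws : List String) : Nat → Nat
  | 0 => 0
  | j + 1 => if ws.getD (j + 1) "" == "not" then j + 1 else pvBackNot ws j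

def ReplacingString_alt (string : String) : String :=
  let words := PySem.Str.split₀ string
  match pvFindPoorB words words 0 with
  | none => string ++ "!"
  | some p =>
    let notIndex := pvBackNot words (p - 1)
    PySem.Str.join " " (words.take notIndex ++ ["good"] ++ words.drop (p + 1)) ++ "!"

-- ===== PRECONDITION & SPEC =====
def Spec_ReplacingString (string : String) (out : String) : Prop := out = ReplacingString_alt string
instance (string : String) (out : String) : Decidable (Spec_ReplacingString string out) := by unfold Spec_ReplacingString; infer_instance

-- ===== CLAIM (what is proved, stated in full; the proofs are below) =====
def Claim_equal_ReplacingString : Prop := ∀ (string : String), Dom_ReplacingString string → Spec_ReplacingString string (ReplacingString string)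

-- ===== LEMMAS AND PROOFS =====

-- index of the last exact "not" in the list (acc if none); mirrors A's notIndex evolution
def pvLastNot : List String → Nat → Nat → Nat
  | [], _, acc => acc
  | w :: r, i, acc => pvLastNot r (i + 1) (if w == "not" then i else acc)

theorem pvLastNot_snoc (pre : List String) (w : String) :
    ∀ (i acc : Nat), pvLastNot (pre ++ [w]) i acc =
      if w == "not" then i + pre.length else pvLastNot pre i acc := by
  induction pre with
  | nil => intro i acc; simp [pvLastNot]
  | cons x t ih =>
    intro i acc
    simp only [List.cons_append, pvLastNot, ih, List.length_cons]
    split_ifs <;> omega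

theorem pvContains_snoc (l : List String) (w : String) :
    (l ++ [w]).contains "not" = (l.contains "not" || (w == "not")) := by
  rw [List.contains_append]
  cases hw : (w == "not") with
  | true =>
    have hweq : w = "not" := eq_of_beq hw
    subst hweq; simp
  | false =>
    have h1 : List.contains [w] "not" = false := by
      apply Bool.eq_false_iff.mpr
      intro hq
      have hq' : "not" = w := by
        simp only [List.contains_cons, List.contains_nil, Bool.or_false] at hq
        exact eq_of_beq hq
      rw [← hq'] at hw
      simp at hw
    rw [h1]

theorem pvLastNot_lt_and_get (l : List String) (h : l.contains "not" = true) :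
    pvLastNot l 0 0 < l.length ∧ l.getD (pvLastNot l 0 0) "" = "not" := by
  induction l using List.reverseRecOn with
  | nil => simp at h
  | append_singleton t w ih =>
    rw [pvLastNot_snoc]
    cases hw : (w == "not") with
    | true =>
      have hweq : w = "not" := eq_of_beq hw
      rw [if_pos rfl]
      refine ⟨by simp, ?_⟩
      rw [Nat.zero_add, List.getD, List.getElem?_append_right (le_refl _)]
      simp [hweq]
    | false =>
      have ht : t.contains "not" = true := by
        rw [pvContains_snoc, hw, Bool.or_false] at h
        exact h
      obtain ⟨h1, h2⟩ := ih ht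
      simp only [Bool.false_eq_true, if_false]
      refine ⟨by simp; omega, ?_⟩
      rw [List.getD, List.getElem?_append_left h1]
      rw [List.getD] at h2
      exact h2

theorem pvBackNot_eq_lastNot (ws : List String) :
    ∀ (j : Nat), j + 1 ≤ ws.length → (ws.take (j + 1)).contains "not" = true →
      pvBackNot ws j = pvLastNot (ws.take (j + 1)) 0 0 := by
  intro j
  induction j with
  | zero =>
    intro hlen hc
    obtain ⟨a, t, rfl⟩ : ∃ a t, ws = a :: t := by
      cases ws with
      | nil => simp at hlen
      | cons a t => exact ⟨a, t, rfl⟩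
    simp only [List.take_succ_cons, List.take_zero, List.contains_cons,
      List.contains_nil, Bool.or_false] at hc
    have ha : a = "not" := (eq_of_beq hc).symm
    simp [pvBackNot, pvLastNot, ha]
  | succ k ih =>
    intro hlen hc
    have hk1 : k + 1 < ws.length := by omega
    have htake : ws.take (k + 2) = ws.take (k + 1) ++ [ws[k + 1]] := by
      rw [List.take_add_one, List.getElem?_eq_getElem hk1]
      rfl
    have hgetD : ws.getD (k + 1) "" = ws[k + 1] := by
      rw [List.getD, List.getElem?_eq_getElem hk1]; rfl
    have htlen : (ws.take (k + 1)).length = k + 1 := by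
      rw [List.length_take]; omega
    rw [htake, pvLastNot_snoc, pvBackNot, hgetD]
    cases hw : (ws[k + 1] == "not") with
    | true =>
      simp [htlen]
    | false =>
      simp only [Bool.false_eq_true, if_false]
      have hc' : (ws.take (k + 1)).contains "not" = true := by
        rw [htake, pvContains_snoc, hw, Bool.or_false] at hc
        exact hc
      exact ih (by omega) hc'

theorem pvFindPoorB_props :
    ∀ (rest pre : List String) (p : Nat),
      pvFindPoorB (pre ++ rest) rest pre.length = some p →
      pre.length ≤ p ∧ p < (pre ++ rest).length ∧
        ((pre ++ rest).take p).contains "not" = true := by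
  intro rest
  induction rest with
  | nil => intro pre p h; simp [pvFindPoorB] at h
  | cons w rest' ih =>
    intro pre p h
    rw [pvFindPoorB] at h
    split at h
    · rename_i hcond
      have hp : p = pre.length := (Option.some.inj h).symm
      subst hp
      have htake : List.take pre.length (pre ++ w :: rest') = pre := by simp
      rw [htake] at hcond ⊢
      exact ⟨le_refl _, by simp, (Bool.and_eq_true_iff.mp hcond).2⟩
    · have h' : pvFindPoorB ((pre ++ [w]) ++ rest') rest' (pre ++ [w]).length = some p := by
        rw [List.append_assoc, List.length_append]
        simpa using h
      obtain ⟨h1, h2, h3⟩ := ih (pre ++ [w]) p h'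
      rw [List.append_assoc, List.singleton_append] at h2 h3
      simp only [List.length_append, List.length_cons, List.length_nil] at h1 h2 ⊢
      exact ⟨by omega, by omega, h3⟩

theorem pvLoopA_eq :
    ∀ (rest pre : List String),
      pvLoopA rest pre.length (pre.contains "not") (pvLastNot pre 0 0) =
        match pvFindPoorB (pre ++ rest) rest pre.length with
        | some p => (true, pvLastNot ((pre ++ rest).take p) 0 0, true, p)
        | none => ((pre ++ rest).contains "not", pvLastNot (pre ++ rest) 0 0, false, 0) := by
  intro rest
  induction rest with
  | nil => intro pre; simp [pvLoopA, pvFindPoorB]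
  | cons w rest' ih =>
    intro pre
    rw [pvLoopA, pvFindPoorB]
    have htake : List.take pre.length (pre ++ w :: rest') = pre := by simp
    have hassoc : (pre ++ [w]) ++ rest' = pre ++ w :: rest' := by simp
    have hlen : (pre ++ [w]).length = pre.length + 1 := by simp
    have hpre := ih (pre ++ [w])
    rw [pvLastNot_snoc, pvContains_snoc, hassoc, hlen] at hpre
    cases hw : (w == "not") with
    | true =>
      have hweq : w = "not" := eq_of_beq hw
      have hlow : (PySem.Str.lower w == "poor") = false := by rw [hweq]; decide
      rw [hw] at hpre
      rw [if_pos rfl, Nat.zero_add, Bool.or_true] at hpre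
      simp only [hlow, Bool.and_false, Bool.false_and, Bool.false_eq_true, if_false]
      exact hpre
    | false =>
      rw [hw] at hpre
      simp only [Bool.false_eq_true, if_false, Bool.or_false] at hpre
      simp only [Bool.false_eq_true, if_false, htake]
      cases hc1 : (PySem.Str.lower w == "poor") with
      | true =>
        cases hc2 : (pre.contains "not") with
        | true =>
          simp [htake]
        | false =>
          simp only [Bool.and_false, Bool.false_eq_true, if_false]
          rw [hc2] at hpre
          exact hpre
      | false =>
        simp only [Bool.and_false, Bool.false_and, Bool.false_eq_true, if_false]
        exact hpre

-- ===== VERDICT (by name: the statement is the Claim_ definition above) =====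
theorem ReplacingString_spec : Claim_equal_ReplacingString := by
  intro string _
  unfold Spec_ReplacingString ReplacingString ReplacingString_alt
  set ws := PySem.Str.split₀ string with hws
  have hloop := pvLoopA_eq ws []
  simp only [List.nil_append, List.length_nil, List.contains_nil, pvLastNot] at hloop
  cases hfind : pvFindPoorB ws ws 0 with
  | none =>
    rw [hfind] at hloop
    simp [hloop, hfind]
  | some p =>
    rw [hfind] at hloop
    obtain ⟨-, hplen, hcont⟩ := by
      have := pvFindPoorB_props ws [] p
      simp only [List.nil_append, List.length_nil] at this
      exact this hfind
    have hp0 : 1 ≤ p := by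
      rcases Nat.eq_zero_or_pos p with h | h
      · subst h; simp at hcont
      · exact h
    obtain ⟨hlt, -⟩ := pvLastNot_lt_and_get (ws.take p) hcont
    have htlen : (ws.take p).length = p := by
      rw [List.length_take]; omega
    have hni_lt : pvLastNot (ws.take p) 0 0 < p := by rw [htlen] at hlt; exact hlt
    have hback : pvBackNot ws (p - 1) = pvLastNot (ws.take p) 0 0 := by
      have := pvBackNot_eq_lastNot ws (p - 1) (by omega)
      rw [Nat.sub_add_cancel hp0] at this
      exact this hcont
    simp only [hloop, hfind, hback, Bool.true_and, decide_eq_true_eq, if_pos hni_lt]
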